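-- pv_equiv track=rewrite | github.com/Angel-Avila/iaPiano | pythonScript/textToCSV.py | getNoteEndTime
-- ===== SOURCE A (Python) =====
-- STEP = 1
--
-- def getNoteEndTime(songString, index, startTime):
--     consecutiveSpaces = 0
--     endTime = startTime
--     notesInWord = []
--     note = songString[index]
--
--     for i in range(index, len(songString)):
--         if songString[i] == ' ':
--
--             consecutiveSpaces+=1
--
--             if note not in notesInWord:
--                 return endTime
--
--             del notesInWord[:]
--             if consecutiveSpaces == 2:
--                 return endTime
--
--             endTime += STEP
--         else:
--             notesInWord.append(songString[i])
--             consecutiveSpaces = 0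
--
--     return endTime + STEP
-- ===== SOURCE B (Python) =====
-- STEP = 1
--
-- def getNoteEndTime(songString, index, startTime):
--     note = songString[index]
--     scanned = ''.join(songString[i] for i in range(index, len(songString)))
--     tokens = scanned.split(' ')
--     endTime = startTime
--     for tok in tokens[:-1]:
--         if note not in tok:
--             return endTime
--         endTime += STEP
--     return endTime + STEP
-- ===== Notes on version B (the rewrite author's own statement) =====
-- stated objective: simpler
-- what changed: Replaced A's character-by-character state machine (consecutiveSpaces counter, notesInWord accumulator, dead double-space branch) by splitting the scanned text on spaces once and looping over the resulting tokens: return endTime at the first token not containing the note, add STEP per passed token, STEP extra for the final token.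
import Mathlib
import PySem

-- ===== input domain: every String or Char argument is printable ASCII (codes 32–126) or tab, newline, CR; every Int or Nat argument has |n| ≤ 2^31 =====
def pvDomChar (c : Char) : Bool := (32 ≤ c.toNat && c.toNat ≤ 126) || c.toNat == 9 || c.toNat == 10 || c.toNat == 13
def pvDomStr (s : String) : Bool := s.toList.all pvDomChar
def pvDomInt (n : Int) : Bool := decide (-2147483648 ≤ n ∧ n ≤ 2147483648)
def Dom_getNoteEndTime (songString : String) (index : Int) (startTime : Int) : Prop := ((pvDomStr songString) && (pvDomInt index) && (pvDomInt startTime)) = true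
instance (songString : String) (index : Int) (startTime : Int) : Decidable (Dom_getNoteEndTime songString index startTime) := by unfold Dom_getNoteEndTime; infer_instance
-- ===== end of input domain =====

-- B replaces A's per-character state machine (consecutiveSpaces / notesInWord accumulator)
-- by splitting the scanned text on spaces once and looping over the tokens (objective: simpler).

-- ===== PORT A =====
-- the for-loop of A: recursion over the remaining indices of range(index, len(songString)),
-- carrying the same state (consecutiveSpaces, endTime, notesInWord); early returns are the
-- non-recursive branches.  songString[i] is in range on every visited i whenever
-- songString[index] was (Pre_), so pyGetD is exact there.
def getNoteEndTimeLoopA (cs : List Char) (note : Char) (idxs : List Int)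
    (consecutiveSpaces endTime : Int) (notesInWord : List Char) : Int :=
  match idxs with
  | [] => endTime + 1                                   -- return endTime + STEP
  | i :: rest =>
    let c := PySem.List.pyGetD cs i ' '
    if c = ' ' then
      -- consecutiveSpaces += 1
      if note ∈ notesInWord then
        (if consecutiveSpaces + 1 = 2 then endTime      -- return endTime
         else getNoteEndTimeLoopA cs note rest (consecutiveSpaces + 1) (endTime + 1) [])
      else endTime                                      -- return endTime
    else getNoteEndTimeLoopA cs note rest 0 endTime (notesInWord ++ [c])

def getNoteEndTime (songString : String) (index : Int) (startTime : Int) : Int :=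
  let cs := songString.toList
  match PySem.List.pyGet? cs index with
  | none => 0                                           -- IndexError: excluded by Pre_
  | some note => getNoteEndTimeLoopA cs note (PySem.List.pyRange index (cs.length : Int) 1) 0 startTime []

-- ===== PORT B =====
-- hand port of str.split(' ') (single-char separator, keeps empty pieces); exact for that call
def splitSp : List Char → List (List Char)
  | [] => [[]]
  | c :: rest =>
    if c = ' ' then [] :: splitSp rest
    else
      match splitSp rest with
      | t :: ts => (c :: t) :: ts
      | [] => [[c]]                                     -- unreachable: splitSp never returns []

-- Source B's token loop: every token but the last, then the final 'return endTime + STEP'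
def tokLoop (note : Char) (endTime : Int) : List (List Char) → Int
  | [] => endTime + 1                                   -- unreachable: split(' ') gives ≥ 1 token
  | [_] => endTime + 1                                  -- past tokens[:-1]: return endTime + STEP
  | t :: ts => if note ∈ t then tokLoop note (endTime + 1) ts else endTime

def getNoteEndTime_alt (songString : String) (index : Int) (startTime : Int) : Int :=
  let cs := songString.toList
  match PySem.List.pyGet? cs index with
  | none => 0                                           -- IndexError: excluded by Pre_
  | some note =>
    let scanned := (PySem.List.pyRange index (cs.length : Int) 1).map (fun i => PySem.List.pyGetD cs i ' ')
    tokLoop note startTime (splitSp scanned)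

-- ===== PRECONDITION & SPEC =====
-- Pre_: songString[index] must not raise IndexError, i.e. -len ≤ index < len
def Pre_getNoteEndTime (songString : String) (index : Int) (startTime : Int) : Prop :=
  PySem.Raise.InRange songString.toList.length index
instance (songString : String) (index : Int) (startTime : Int) : Decidable (Pre_getNoteEndTime songString index startTime) := by unfold Pre_getNoteEndTime; infer_instance

def pvWitness_getNoteEndTime : String × Int × Int := ("ab a b", 0, 5)

def Spec_getNoteEndTime (songString : String) (index : Int) (startTime : Int) (out : Int) : Prop := out = getNoteEndTime_alt songString index startTime
instance (songString : String) (index : Int) (startTime : Int) (out : Int) : Decidable (Spec_getNoteEndTime songString index startTime out) := by unfold Spec_getNoteEndTime; infer_instance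

-- ===== CLAIM (what is proved, stated in full; the proofs are below) =====
def Claim_equal_getNoteEndTime : Prop := ∀ (songString : String) (index : Int) (startTime : Int), Dom_getNoteEndTime songString index startTime → Pre_getNoteEndTime songString index startTime → Spec_getNoteEndTime songString index startTime (getNoteEndTime songString index startTime)

-- ===== LEMMAS AND PROOFS =====

-- A's state machine over the scanned characters themselves (goal of the bridge lemma below)
def charA (note : Char) : List Char → Int → Int → List Char → Int
  | [], _, et, _ => et + 1
  | c :: rest, sp, et, w =>
    if c = ' ' then
      if note ∈ w then (if sp + 1 = 2 then et else charA note rest (sp + 1) (et + 1) [])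
      else et
    else charA note rest 0 et (w ++ [c])

theorem loopA_eq_charA (cs : List Char) (note : Char) (idxs : List Int)
    (sp et : Int) (w : List Char) :
    getNoteEndTimeLoopA cs note idxs sp et w
      = charA note (idxs.map (fun i => PySem.List.pyGetD cs i ' ')) sp et w := by
  induction idxs generalizing sp et w with
  | nil => simp [getNoteEndTimeLoopA, charA]
  | cons i rest ih =>
    simp only [getNoteEndTimeLoopA, List.map_cons, charA]
    split_ifs with h1 h2 h3 <;> simp_all

theorem splitSp_ne_nil (cs : List Char) : splitSp cs ≠ [] := by
  cases cs with
  | nil => simp [splitSp]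
  | cons c rest =>
    simp only [splitSp]
    split_ifs with h
    · simp
    · cases hs : splitSp rest <;> simp

theorem splitSp_no_space (w : List Char) (hw : ' ' ∉ w) : splitSp w = [w] := by
  induction w with
  | nil => rfl
  | cons c rest ih =>
    simp only [List.mem_cons, not_or] at hw
    simp [splitSp, Ne.symm hw.1, ih hw.2]

theorem splitSp_append_space (w rest : List Char) (hw : ' ' ∉ w) :
    splitSp (w ++ ' ' :: rest) = w :: splitSp rest := by
  induction w with
  | nil => simp [splitSp]
  | cons c w' ih =>
    simp only [List.mem_cons, not_or] at hw
    simp [splitSp, Ne.symm hw.1, ih hw.2]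

theorem charA_eq_tokLoop (note : Char) (cs : List Char) (sp et : Int) (w : List Char)
    (hw : ' ' ∉ w) (hinv : sp = 0 ∨ w = []) :
    charA note cs sp et w = tokLoop note et (splitSp (w ++ cs)) := by
  induction cs generalizing sp et w with
  | nil =>
    rw [List.append_nil, splitSp_no_space w hw]
    simp [charA, tokLoop]
  | cons c rest ih =>
    by_cases hc : c = ' '
    · subst hc
      rw [splitSp_append_space w rest hw]
      obtain ⟨t, ts, hts⟩ : ∃ t ts, splitSp rest = t :: ts := by
        cases h : splitSp rest with
        | nil => exact absurd h (splitSp_ne_nil rest)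
        | cons t ts => exact ⟨t, ts, rfl⟩
      rw [hts]
      by_cases hm : note ∈ w
      · have hw0 : w ≠ [] := by rintro rfl; simp at hm
        have hsp : sp = 0 := hinv.resolve_right hw0
        subst hsp
        have h2 : ¬((0:Int) + 1 = 2) := by norm_num
        simp only [charA, tokLoop, if_true, if_pos hm, if_neg h2]
        norm_num
        rw [ih 1 (et + 1) [] (by simp) (Or.inr rfl), List.nil_append, hts]
      · simp [charA, tokLoop, hm]
    · have hsplit : w ++ c :: rest = (w ++ [c]) ++ rest := by simp
      rw [hsplit]
      simp only [charA, if_neg hc]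
      refine ih 0 et (w ++ [c]) ?_ (Or.inl rfl)
      simp only [List.mem_append, List.mem_singleton, not_or]
      exact ⟨hw, fun h => hc h.symm⟩

-- ===== VERDICT (by name: the statement is the Claim_ definition above) =====
theorem getNoteEndTime_spec : Claim_equal_getNoteEndTime := by
  intro songString index startTime _ hPre
  unfold Spec_getNoteEndTime getNoteEndTime getNoteEndTime_alt
  cases h : PySem.List.pyGet? songString.toList index with
  | none => exact absurd hPre ((PySem.List.pyGet?_eq_none_iff _ _).mp h)
  | some note =>
    simp only [h]
    rw [loopA_eq_charA]
    exact charA_eq_tokLoop note _ 0 startTime [] (by simp) (Or.inl rfl)
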